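-- pv_equiv track=rewrite | github.com/xli1110/Interview-Problems | Amazon - SDE/Interview - 1.py | routePairs
-- ===== SOURCE A (Python) =====
-- def routePairs(maxTravelDist, forwardRouteList, returnRouteList):
--     # Write your code here
--     res = []
--     max_route = 0
--
--     for x1 in forwardRouteList:
--         for x2 in returnRouteList:
--             if x1[1] + x2[1] == max_route:
--                 res.append([x1[0], x2[0]])  # add a new pair
--             if x1[1] + x2[1] > max_route and x1[1] + x2[1] <= maxTravelDist:
--                 max_route = x1[1] + x2[1]
--                 res = []  # clear the old array
--                 res.append([x1[0], x2[0]])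
--
--     return res
-- ===== SOURCE B (Python) =====
-- def routePairs(maxTravelDist, forwardRouteList, returnRouteList):
--     if not forwardRouteList or not returnRouteList:
--         return []
--     # group return route ids by their distance value (insertion order kept)
--     by_val = {}
--     for r in returnRouteList:
--         by_val.setdefault(r[1], []).append(r[0])
--     vals = sorted(by_val)
--     best = 0
--     for f in forwardRouteList:
--         t = maxTravelDist - f[1]
--         # binary search: lo = number of values in vals that are <= t
--         lo, hi = 0, len(vals)
--         while lo < hi:
--             mid = (lo + hi) // 2
--             if vals[mid] <= t:
--                 lo = mid + 1
--             else:
--                 hi = mid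
--         if lo > 0:
--             s = f[1] + vals[lo - 1]
--             if s > best:
--                 best = s
--     res = []
--     for f in forwardRouteList:
--         for b in by_val.get(best - f[1], []):
--             res.append([f[0], b])
--     return res
-- ===== Notes on version B (the rewrite author's own statement) =====
-- stated objective: faster
-- what changed: A streams over all n*m pairs keeping a running max with destructive resets; B groups return ids by distance in a dict, sorts the distinct distances, binary-searches the best reachable sum per forward route, and collects the matching pairs via dict lookup, so no pairwise scan remains.
import Mathlib
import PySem

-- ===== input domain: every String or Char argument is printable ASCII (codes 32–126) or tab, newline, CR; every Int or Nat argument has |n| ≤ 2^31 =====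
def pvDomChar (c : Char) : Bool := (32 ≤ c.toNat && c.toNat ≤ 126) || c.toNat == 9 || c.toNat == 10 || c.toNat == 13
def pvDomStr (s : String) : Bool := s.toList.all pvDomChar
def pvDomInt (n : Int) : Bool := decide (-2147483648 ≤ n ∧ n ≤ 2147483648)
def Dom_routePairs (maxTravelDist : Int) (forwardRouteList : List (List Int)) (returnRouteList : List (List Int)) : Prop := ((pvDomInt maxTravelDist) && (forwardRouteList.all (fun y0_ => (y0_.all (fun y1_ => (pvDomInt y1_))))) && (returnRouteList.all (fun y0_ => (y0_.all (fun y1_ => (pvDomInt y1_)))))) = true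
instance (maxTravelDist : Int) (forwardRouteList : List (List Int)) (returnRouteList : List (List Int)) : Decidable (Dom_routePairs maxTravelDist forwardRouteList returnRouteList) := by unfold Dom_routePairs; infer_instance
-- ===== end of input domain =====

-- B replaces A's quadratic streaming scan by: group return ids by value in a dict, sort the
-- distinct values, binary-search the best reachable sum per forward route, then collect the
-- matching pairs through the dict (equivalence is about the return value; neither program
-- mutates its arguments).

-- xs[i]: i is 0 or 1 here and in range on every input Pre_ admits (out of range Python raises,
-- excluded by Pre_), so the total form pyGetD is exact
def pvIdx (xs : List Int) (i : Int) : Int := PySem.List.pyGetD xs i 0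

-- ===== PORT A =====
def routePairs (maxTravelDist : Int) (forwardRouteList : List (List Int)) (returnRouteList : List (List Int)) : List (List Int) :=
  (List.foldl (fun (st : List (List Int) × Int) x1 =>
      List.foldl (fun (st : List (List Int) × Int) x2 =>
          let s := pvIdx x1 1 + pvIdx x2 1
          let st1 := if s = st.2 then (st.1 ++ [[pvIdx x1 0, pvIdx x2 0]], st.2) else st
          if st1.2 < s ∧ s ≤ maxTravelDist then ([[pvIdx x1 0, pvIdx x2 0]], s) else st1)
        st returnRouteList)
    ([], 0) forwardRouteList).1

-- ===== PORT B =====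
-- the hand-written bisect_right loop of Source B (lo, hi are nonnegative Python ints, hence Nat;
-- vals[mid] with 0 ≤ mid < vals.length is exact as List.getD)
def pvBisect (vals : List Int) (t : Int) (lo hi : Nat) : Nat :=
  if _h : lo < hi then
    let mid := (lo + hi) / 2
    if vals.getD mid 0 ≤ t then pvBisect vals t (mid + 1) hi
    else pvBisect vals t lo mid
  else lo
termination_by hi - lo
decreasing_by all_goals omega

def routePairs_alt (maxTravelDist : Int) (forwardRouteList : List (List Int)) (returnRouteList : List (List Int)) : List (List Int) :=
  if forwardRouteList = [] ∨ returnRouteList = [] then []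
  else
    let byVal := List.foldl
      (fun (d : PySem.Dict Int (List Int)) r => d.modify (pvIdx r 1) [] (fun v => v ++ [pvIdx r 0]))
      PySem.Dict.empty returnRouteList
    let vals := PySem.List.sorted byVal.keys (fun x => x)
    let best := List.foldl (fun (best : Int) f =>
        let lo := pvBisect vals (maxTravelDist - pvIdx f 1) 0 vals.length
        if 0 < lo then
          let s := pvIdx f 1 + vals.getD (lo - 1) 0
          if best < s then s else best
        else best) 0 forwardRouteList
    List.foldl (fun (res : List (List Int)) f =>
        res ++ (byVal.getD (best - pvIdx f 1) []).map (fun b => [pvIdx f 0, b]))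
      [] forwardRouteList

-- ===== PRECONDITION & SPEC =====
-- Pre_ excludes exactly the inputs where Python A raises IndexError: both lists nonempty
-- (so every sublist gets indexed) and some sublist shorter than 2.
def Pre_routePairs (maxTravelDist : Int) (forwardRouteList : List (List Int)) (returnRouteList : List (List Int)) : Prop :=
  forwardRouteList = [] ∨ returnRouteList = [] ∨
    ((∀ x ∈ forwardRouteList, 2 ≤ x.length) ∧ (∀ x ∈ returnRouteList, 2 ≤ x.length))
instance (maxTravelDist : Int) (forwardRouteList : List (List Int)) (returnRouteList : List (List Int)) : Decidable (Pre_routePairs maxTravelDist forwardRouteList returnRouteList) := by unfold Pre_routePairs; infer_instance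

def pvWitness_routePairs : Int × List (List Int) × List (List Int) := (10, [[1, 3]], [[2, 4]])

def Spec_routePairs (maxTravelDist : Int) (forwardRouteList : List (List Int)) (returnRouteList : List (List Int)) (out : List (List Int)) : Prop := out = routePairs_alt maxTravelDist forwardRouteList returnRouteList
instance (maxTravelDist : Int) (forwardRouteList : List (List Int)) (returnRouteList : List (List Int)) (out : List (List Int)) : Decidable (Spec_routePairs maxTravelDist forwardRouteList returnRouteList out) := by unfold Spec_routePairs; infer_instance

-- ===== CLAIM (what is proved, stated in full; the proofs are below) =====
def Claim_equal_routePairs : Prop := ∀ (maxTravelDist : Int) (forwardRouteList : List (List Int)) (returnRouteList : List (List Int)), Dom_routePairs maxTravelDist forwardRouteList returnRouteList → Pre_routePairs maxTravelDist forwardRouteList returnRouteList → Spec_routePairs maxTravelDist forwardRouteList returnRouteList (routePairs maxTravelDist forwardRouteList returnRouteList)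

-- ===== LEMMAS AND PROOFS =====

def pvSum (f r : List Int) : Int := pvIdx f 1 + pvIdx r 1
def pvOut (f r : List Int) : List Int := [pvIdx f 0, pvIdx r 0]
def pvStep (lim : Int) (st : List (List Int) × Int) (p : List Int × List Int) : List (List Int) × Int :=
  let s := pvIdx p.1 1 + pvIdx p.2 1
  let st1 := if s = st.2 then (st.1 ++ [[pvIdx p.1 0, pvIdx p.2 0]], st.2) else st
  if st1.2 < s ∧ s ≤ lim then ([[pvIdx p.1 0, pvIdx p.2 0]], s) else st1
def pvPairs (fwd rtn : List (List Int)) : List (List Int × List Int) :=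
  fwd.flatMap (fun f => rtn.map (fun r => (f, r)))
def pvMaxStep (lim m s : Int) : Int := if m < s ∧ s ≤ lim then s else m
def pvMF (lim : Int) (ps : List (List Int × List Int)) (m0 : Int) : Int :=
  ps.foldl (fun m p => pvMaxStep lim m (pvSum p.1 p.2)) m0

lemma pv_flatten (lim : Int) (fwd rtn : List (List Int)) (st : List (List Int) × Int) :
    List.foldl (fun (st : List (List Int) × Int) x1 =>
      List.foldl (fun (st : List (List Int) × Int) x2 =>
          let s := pvIdx x1 1 + pvIdx x2 1
          let st1 := if s = st.2 then (st.1 ++ [[pvIdx x1 0, pvIdx x2 0]], st.2) else st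
          if st1.2 < s ∧ s ≤ lim then ([[pvIdx x1 0, pvIdx x2 0]], s) else st1)
        st rtn) st fwd
    = (pvPairs fwd rtn).foldl (pvStep lim) st := by
  induction fwd generalizing st with
  | nil => rfl
  | cons f fwd ih =>
      have hin : List.foldl (fun (st : List (List Int) × Int) x2 =>
          let s := pvIdx f 1 + pvIdx x2 1
          let st1 := if s = st.2 then (st.1 ++ [[pvIdx f 0, pvIdx x2 0]], st.2) else st
          if st1.2 < s ∧ s ≤ lim then ([[pvIdx f 0, pvIdx x2 0]], s) else st1) st rtn
          = List.foldl (pvStep lim) st (List.map (fun r => (f, r)) rtn) := by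
        rw [List.foldl_map]; rfl
      calc List.foldl _ st (f :: fwd)
          = List.foldl _ (List.foldl (pvStep lim) st (List.map (fun r => (f, r)) rtn)) fwd := by
            rw [List.foldl_cons, hin]
        _ = List.foldl (pvStep lim) (List.foldl (pvStep lim) st (List.map (fun r => (f, r)) rtn)) (pvPairs fwd rtn) := ih _
        _ = List.foldl (pvStep lim) st (pvPairs (f :: fwd) rtn) := by
            simp only [pvPairs, List.flatMap_cons, List.foldl_append]

lemma pvMF_mono (lim : Int) (ps : List (List Int × List Int)) (m0 : Int) : m0 ≤ pvMF lim ps m0 := by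
  induction ps generalizing m0 with
  | nil => exact le_refl _
  | cons p ps ih =>
      refine le_trans ?_ (ih (pvMaxStep lim m0 (pvSum p.1 p.2)))
      unfold pvMaxStep; split_ifs with h; exact le_of_lt h.1; exact le_refl _

lemma pvMF_ge (lim : Int) (ps : List (List Int × List Int)) (m0 : Int) (q : List Int × List Int)
    (hq : q ∈ ps) (hle : pvSum q.1 q.2 ≤ lim) : pvSum q.1 q.2 ≤ pvMF lim ps m0 := by
  induction ps generalizing m0 with
  | nil => cases hq
  | cons p ps ih =>
      rcases List.mem_cons.mp hq with h | h
      · subst h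
        refine le_trans ?_ (pvMF_mono lim ps _)
        show pvSum q.1 q.2 ≤ pvMaxStep lim m0 (pvSum q.1 q.2)
        unfold pvMaxStep; split_ifs with h2
        · exact le_refl _
        · omega
      · exact ih _ h

lemma pvMF_cases (lim : Int) (ps : List (List Int × List Int)) (m0 : Int) :
    pvMF lim ps m0 = m0 ∨ ∃ q ∈ ps, pvMF lim ps m0 = pvSum q.1 q.2 ∧ pvMF lim ps m0 ≤ lim := by
  induction ps generalizing m0 with
  | nil => exact Or.inl rfl
  | cons p ps ih =>
      have step : pvMF lim (p :: ps) m0 = pvMF lim ps (pvMaxStep lim m0 (pvSum p.1 p.2)) := rfl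
      rcases ih (pvMaxStep lim m0 (pvSum p.1 p.2)) with h | ⟨q, hq, h1, h2⟩
      · rw [step, h]
        unfold pvMaxStep; split_ifs with hc
        · exact Or.inr ⟨p, List.mem_cons_self .., rfl, hc.2⟩
        · exact Or.inl rfl
      · exact Or.inr ⟨q, List.mem_cons_of_mem _ hq, by rw [step]; exact ⟨h1, h2⟩⟩

lemma pvMF_append (lim : Int) (ps qs : List (List Int × List Int)) (m0 : Int) :
    pvMF lim (ps ++ qs) m0 = pvMF lim qs (pvMF lim ps m0) := by
  unfold pvMF; rw [List.foldl_append]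

lemma pvA_char (lim : Int) (ps : List (List Int × List Int)) :
    ps.foldl (pvStep lim) ([], 0)
      = ((ps.filter (fun p => pvSum p.1 p.2 == pvMF lim ps 0)).map (fun p => pvOut p.1 p.2),
         pvMF lim ps 0) := by
  induction ps using List.reverseRecOn with
  | nil => rfl
  | append_singleton qs p ih =>
      have hM : pvMF lim (qs ++ [p]) 0 = pvMaxStep lim (pvMF lim qs 0) (pvSum p.1 p.2) := by
        rw [pvMF_append]; rfl
      have hM0 : (0:Int) ≤ pvMF lim qs 0 := pvMF_mono lim qs 0
      have hfq : ∀ X : Int, pvMF lim qs 0 < X → X ≤ lim →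
          qs.filter (fun q => pvIdx q.1 1 + pvIdx q.2 1 == X) = [] := by
        intro X hlt hle
        rw [List.filter_eq_nil_iff]
        intro q hq hbe
        rw [beq_iff_eq] at hbe
        have := pvMF_ge lim qs 0 q hq (by simp only [pvSum]; omega)
        simp only [pvSum] at this; omega
      rw [List.foldl_append, ih, List.foldl_cons, List.foldl_nil, hM,
          List.filter_append, List.map_append]
      simp only [pvStep, pvMaxStep, pvSum, pvOut, List.filter_cons, List.filter_nil, beq_iff_eq]
      by_cases h1 : pvIdx p.1 1 + pvIdx p.2 1 = pvMF lim qs 0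
      · rw [if_pos h1]
        have hc : ¬ ((pvMF lim qs 0) < pvIdx p.1 1 + pvIdx p.2 1 ∧ pvIdx p.1 1 + pvIdx p.2 1 ≤ lim) := by omega
        rw [if_neg hc, if_neg (by omega : ¬ (pvMF lim qs 0 < pvIdx p.1 1 + pvIdx p.2 1 ∧ pvIdx p.1 1 + pvIdx p.2 1 ≤ lim))]
        simp [h1]
      · rw [if_neg h1]
        by_cases h2 : pvMF lim qs 0 < pvIdx p.1 1 + pvIdx p.2 1 ∧ pvIdx p.1 1 + pvIdx p.2 1 ≤ lim
        · rw [if_pos h2, if_pos h2]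
          rw [hfq _ h2.1 h2.2]
          simp
        · rw [if_neg h2, if_neg h2]
          simp [h1]

def pvGroup (rtn : List (List Int)) : PySem.Dict Int (List Int) :=
  List.foldl (fun (d : PySem.Dict Int (List Int)) r => d.modify (pvIdx r 1) [] (fun v => v ++ [pvIdx r 0]))
    PySem.Dict.empty rtn
def pvVals (rtn : List (List Int)) : List Int :=
  PySem.List.sorted (pvGroup rtn).keys (fun x => x)

lemma pvGroup_keys (rtn : List (List Int)) :
    (pvGroup rtn).keys = PySem.Set.ofList (rtn.map (fun r => pvIdx r 1)) := by
  unfold pvGroup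
  rw [PySem.Dict.keys_foldl_modify_key rtn (fun r => pvIdx r 1) [] (fun _ r v => v ++ [pvIdx r 0]) PySem.Dict.empty]
  rfl

lemma pvVals_lt (rtn : List (List Int)) : (pvVals rtn).Pairwise (· < ·) := by
  unfold pvVals
  rw [pvGroup_keys]
  exact PySem.List.sorted_ofList_pairwise_lt _

lemma pvVals_mem (rtn : List (List Int)) (w : Int) :
    w ∈ pvVals rtn ↔ ∃ r ∈ rtn, pvIdx r 1 = w := by
  unfold pvVals
  rw [pvGroup_keys, PySem.List.mem_sorted, PySem.Set.mem_ofList]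
  simp [eq_comm]

lemma pvGroup_getD (rtn : List (List Int)) (k : Int) :
    (pvGroup rtn).getD k [] = (rtn.filter (fun r => pvIdx r 1 == k)).map (fun r => pvIdx r 0) := by
  unfold pvGroup
  rw [show (List.foldl (fun (d : PySem.Dict Int (List Int)) r => d.modify (pvIdx r 1) [] (fun v => v ++ [pvIdx r 0]))
        PySem.Dict.empty rtn)
      = List.foldl (fun (d : PySem.Dict Int (List Int)) p => d.modify p.1 [] (fun v => v ++ [p.2]))
        PySem.Dict.empty (rtn.map (fun r => (pvIdx r 1, pvIdx r 0))) from (@List.foldl_map _ _ _ (fun r => (pvIdx r 1, pvIdx r 0)) (fun d p => d.modify p.1 [] (fun v => v ++ [p.2])) rtn PySem.Dict.empty).symm]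
  rw [PySem.Dict.getD_foldl_modify_append]
  simp [List.filter_map, Function.comp_def]

lemma pvGetD_le (vals : List Int) (hs : vals.Pairwise (· ≤ ·)) (i j : Nat)
    (hij : i ≤ j) (hj : j < vals.length) : vals.getD i 0 ≤ vals.getD j 0 := by
  rw [List.getD_eq_getElem vals 0 (by omega), List.getD_eq_getElem vals 0 hj]
  rcases Nat.eq_or_lt_of_le hij with h | h
  · subst h; exact le_refl _
  · exact List.pairwise_iff_getElem.mp hs i j (by omega) hj h

lemma pvBisect_inv (vals : List Int) (t : Int) (hs : vals.Pairwise (· ≤ ·)) (lo hi : Nat)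
    (hlh : lo ≤ hi) (hhi : hi ≤ vals.length)
    (h1 : ∀ i, i < lo → vals.getD i 0 ≤ t)
    (h2 : ∀ i, hi ≤ i → i < vals.length → t < vals.getD i 0) :
    (lo ≤ pvBisect vals t lo hi ∧ pvBisect vals t lo hi ≤ hi)
      ∧ (∀ i, i < pvBisect vals t lo hi → vals.getD i 0 ≤ t)
      ∧ (∀ i, pvBisect vals t lo hi ≤ i → i < vals.length → t < vals.getD i 0) := by
  induction lo, hi using pvBisect.induct vals t with
  | case1 lo hi h mid hle ih =>
      rw [pvBisect, dif_pos h, if_pos (by exact hle)]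
      simp only [show (lo + hi) / 2 = mid from rfl]
      have hmid : lo ≤ mid ∧ mid < hi := by omega
      have h1' : ∀ i, i < mid + 1 → vals.getD i 0 ≤ t := by
        intro i hi'
        exact le_trans (pvGetD_le vals hs i mid (by omega) (by omega)) hle
      have := ih (by omega) hhi h1' h2
      exact ⟨⟨by omega, this.1.2⟩, this.2.1, this.2.2⟩
  | case2 lo hi h mid hgt ih =>
      rw [pvBisect, dif_pos h, if_neg (by exact hgt)]
      simp only [show (lo + hi) / 2 = mid from rfl]
      have hmid : lo ≤ mid ∧ mid < hi := by omega
      have h2' : ∀ i, mid ≤ i → i < vals.length → t < vals.getD i 0 := by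
        intro i hmi hil
        exact lt_of_not_ge (fun hcon => hgt (le_trans (pvGetD_le vals hs mid i hmi hil) hcon))
      have := ih (by omega) (by omega) h1 h2'
      exact ⟨⟨this.1.1, by omega⟩, this.2.1, this.2.2⟩
  | case3 lo hi h =>
      rw [pvBisect, dif_neg h]
      exact ⟨⟨le_refl _, by omega⟩, h1, fun i hi' hil => h2 i (by omega) hil⟩

def pvBStep (lim : Int) (vals : List Int) (best : Int) (f : List Int) : Int :=
  let lo := pvBisect vals (lim - pvIdx f 1) 0 vals.length
  if 0 < lo then
    let s := pvIdx f 1 + vals.getD (lo - 1) 0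
    if best < s then s else best
  else best

lemma pvBStep_ge (lim : Int) (vals : List Int) (c : Int) (f : List Int) : c ≤ pvBStep lim vals c f := by
  simp only [pvBStep]; split_ifs with h1 h2 <;> omega

lemma pvBStep_cases (lim : Int) (vals : List Int) (hs : vals.Pairwise (· ≤ ·)) (c : Int) (f : List Int) :
    pvBStep lim vals c f = c ∨
      ∃ w ∈ vals, pvBStep lim vals c f = pvIdx f 1 + w ∧ pvBStep lim vals c f ≤ lim := by
  have hinv := pvBisect_inv vals (lim - pvIdx f 1) hs 0 vals.length (by omega) (le_refl _)
    (by omega) (by omega)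
  simp only [pvBStep]
  set r := pvBisect vals (lim - pvIdx f 1) 0 vals.length with hr
  split_ifs with h1 h2
  · refine Or.inr ⟨vals.getD (r - 1) 0, ?_, rfl, ?_⟩
    · rw [List.getD_eq_getElem vals 0 (by omega)]; exact List.getElem_mem _
    · have := hinv.2.1 (r - 1) (by omega); omega
  · exact Or.inl rfl
  · exact Or.inl rfl

lemma pvBStep_dom (lim : Int) (vals : List Int) (hs : vals.Pairwise (· ≤ ·)) (c : Int) (f : List Int)
    (w : Int) (hw : w ∈ vals) (hle : pvIdx f 1 + w ≤ lim) :
    pvIdx f 1 + w ≤ pvBStep lim vals c f := by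
  have hinv := pvBisect_inv vals (lim - pvIdx f 1) hs 0 vals.length (by omega) (le_refl _)
    (by omega) (by omega)
  obtain ⟨i, hi, hiw⟩ := List.mem_iff_getElem.mp hw
  have hiw' : vals.getD i 0 = w := by rw [List.getD_eq_getElem vals 0 hi]; exact hiw
  set r := pvBisect vals (lim - pvIdx f 1) 0 vals.length with hr
  have hir : i < r := by
    by_contra hcon
    have := hinv.2.2 i (by omega) hi
    omega
  have h0r : 0 < r := by omega
  have hle2 : vals.getD i 0 ≤ vals.getD (r - 1) 0 := pvGetD_le vals hs i (r - 1) (by omega) (by omega)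
  simp only [pvBStep]
  rw [← hr, if_pos h0r]
  split_ifs with h2 <;> omega

lemma pvBFold_mono (lim : Int) (vals : List Int) (fwd : List (List Int)) (c : Int) :
    c ≤ List.foldl (pvBStep lim vals) c fwd := by
  induction fwd generalizing c with
  | nil => exact le_refl _
  | cons f fwd ih => exact le_trans (pvBStep_ge lim vals c f) (ih _)

lemma pvBFold_cases (lim : Int) (vals : List Int) (hs : vals.Pairwise (· ≤ ·)) (fwd : List (List Int)) (c : Int) :
    List.foldl (pvBStep lim vals) c fwd = c ∨
      ∃ f ∈ fwd, ∃ w ∈ vals, List.foldl (pvBStep lim vals) c fwd = pvIdx f 1 + w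
        ∧ List.foldl (pvBStep lim vals) c fwd ≤ lim := by
  induction fwd generalizing c with
  | nil => exact Or.inl rfl
  | cons f fwd ih =>
      rw [List.foldl_cons]
      rcases ih (pvBStep lim vals c f) with h | ⟨g, hg, w, hw, h1, h2⟩
      · rw [h]
        rcases pvBStep_cases lim vals hs c f with h' | ⟨w, hw, h1, h2⟩
        · exact Or.inl h'
        · exact Or.inr ⟨f, List.mem_cons_self .., w, hw, h1, h2⟩
      · exact Or.inr ⟨g, List.mem_cons_of_mem _ hg, w, hw, h1, h2⟩

lemma pvBFold_dom (lim : Int) (vals : List Int) (hs : vals.Pairwise (· ≤ ·)) (fwd : List (List Int)) (c : Int)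
    (f : List Int) (hf : f ∈ fwd) (w : Int) (hw : w ∈ vals) (hle : pvIdx f 1 + w ≤ lim) :
    pvIdx f 1 + w ≤ List.foldl (pvBStep lim vals) c fwd := by
  induction fwd generalizing c with
  | nil => cases hf
  | cons g fwd ih =>
      rw [List.foldl_cons]
      rcases List.mem_cons.mp hf with h | h
      · subst h
        exact le_trans (pvBStep_dom lim vals hs c f w hw hle) (pvBFold_mono lim vals fwd _)
      · exact ih _ h

lemma pvPairs_mem (fwd rtn : List (List Int)) (p : List Int × List Int) :
    p ∈ pvPairs fwd rtn ↔ p.1 ∈ fwd ∧ p.2 ∈ rtn := by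
  unfold pvPairs
  simp only [List.mem_flatMap, List.mem_map]
  constructor
  · rintro ⟨f, hf, r, hr, rfl⟩; exact ⟨hf, hr⟩
  · rintro ⟨h1, h2⟩; exact ⟨p.1, h1, p.2, h2, rfl⟩

lemma pvBest_eq_M (lim : Int) (fwd rtn : List (List Int)) :
    List.foldl (pvBStep lim (pvVals rtn)) 0 fwd = pvMF lim (pvPairs fwd rtn) 0 := by
  have hs : (pvVals rtn).Pairwise (· ≤ ·) := (pvVals_lt rtn).imp le_of_lt
  apply le_antisymm
  · rcases pvBFold_cases lim (pvVals rtn) hs fwd 0 with h | ⟨f, hf, w, hw, h1, h2⟩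
    · rw [h]; exact pvMF_mono lim _ 0
    · obtain ⟨r, hr, hrw⟩ := (pvVals_mem rtn w).mp hw
      rw [h1]
      have hmem : (f, r) ∈ pvPairs fwd rtn := (pvPairs_mem fwd rtn (f, r)).mpr ⟨hf, hr⟩
      have := pvMF_ge lim (pvPairs fwd rtn) 0 (f, r) hmem
        (by simp only [pvSum]; rw [hrw]; omega)
      simp only [pvSum] at this
      omega
  · rcases pvMF_cases lim (pvPairs fwd rtn) 0 with h | ⟨q, hq, h1, h2⟩
    · rw [h]; exact pvBFold_mono lim _ fwd 0
    · obtain ⟨hqf, hqr⟩ := (pvPairs_mem fwd rtn q).mp hq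
      have hw : pvIdx q.2 1 ∈ pvVals rtn := (pvVals_mem rtn _).mpr ⟨q.2, hqr, rfl⟩
      have := pvBFold_dom lim (pvVals rtn) hs fwd 0 q.1 hqf (pvIdx q.2 1) hw
        (by simp only [pvSum] at h1; omega)
      simp only [pvSum] at h1
      omega

lemma pv_collect (M : Int) (fwd rtn : List (List Int)) :
    ((pvPairs fwd rtn).filter (fun p => pvSum p.1 p.2 == M)).map (fun p => pvOut p.1 p.2)
      = List.foldl (fun (res : List (List Int)) f =>
          res ++ ((pvGroup rtn).getD (M - pvIdx f 1) []).map (fun b => [pvIdx f 0, b]))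
        [] fwd := by
  rw [PySem.List.foldl_append_eq_flatMap (fun f => ((pvGroup rtn).getD (M - pvIdx f 1) []).map (fun b => [pvIdx f 0, b])) fwd []]
  rw [List.nil_append]
  unfold pvPairs
  rw [List.filter_flatMap, List.map_flatMap]
  apply List.flatMap_congr
  intro f _
  rw [pvGroup_getD, List.filter_map, List.map_map, List.map_map]
  have hfc : List.filter ((fun p => pvSum p.1 p.2 == M) ∘ (fun r => (f, r))) rtn
      = List.filter (fun r => pvIdx r 1 == M - pvIdx f 1) rtn := by
    apply List.filter_congr
    intro r _
    rw [Bool.eq_iff_iff]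
    simp only [Function.comp_apply, beq_iff_eq, pvSum]
    omega
  rw [hfc]
  rfl

-- ===== VERDICT (by name: the statement is the Claim_ definition above) =====
theorem routePairs_spec : Claim_equal_routePairs := by
  intro lim fwd rtn _dom _pre
  unfold Spec_routePairs routePairs routePairs_alt
  rcases eq_or_ne fwd [] with hF | hF
  · subst hF; simp
  rcases eq_or_ne rtn [] with hR | hR
  · subst hR
    simp only [or_true, if_pos]
    have : ∀ (l : List (List Int)) (st : List (List Int) × Int),
        List.foldl (fun (st : List (List Int) × Int) _ => st) st l = st := by
      intro l; induction l with
      | nil => intro st; rfl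
      | cons a l ih => intro st; exact ih st
    exact congrArg Prod.fst (this fwd ([], 0))
  · rw [if_neg (by simp [hF, hR])]
    rw [pv_flatten lim fwd rtn ([], 0), pvA_char lim (pvPairs fwd rtn)]
    have hbest : List.foldl (pvBStep lim (pvVals rtn)) 0 fwd = pvMF lim (pvPairs fwd rtn) 0 :=
      pvBest_eq_M lim fwd rtn
    calc ((pvPairs fwd rtn).filter (fun p => pvSum p.1 p.2 == pvMF lim (pvPairs fwd rtn) 0)).map
            (fun p => pvOut p.1 p.2)
        = List.foldl (fun (res : List (List Int)) f =>
            res ++ ((pvGroup rtn).getD (pvMF lim (pvPairs fwd rtn) 0 - pvIdx f 1) []).map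
              (fun b => [pvIdx f 0, b])) [] fwd := pv_collect _ fwd rtn
      _ = _ := by rw [← hbest]; rfl
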